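-- pv_equiv track=rewrite | github.com/DIVD-NL/web-csirt | divd_team_sync.py | clean_for_yaml
-- ===== SOURCE A (Python) =====
-- import unicodedata
--
-- def clean_for_yaml(text):
--     """
--     Clean text for YAML compatibility by removing problematic Unicode characters.
--     """
--     if not text:
--         return ""
--     # Normalize to decomposed form
--     normalized = unicodedata.normalize('NFKD', text)
--     # Remove all control characters and combining characters
--     cleaned = ''.join(char for char in normalized
--                     if unicodedata.category(char)[0] not in ('C', 'M'))
--     # Convert to ASCII where possible, remove non-ASCII otherwise
--     ascii_cleaned = cleaned.encode('ascii', 'ignore').decode('ascii')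
--     return ascii_cleaned.strip()
-- ===== SOURCE B (Python) =====
-- import unicodedata
--
-- def clean_for_yaml(text):
--     # One streaming pass with an accumulator that performs the strip on the
--     # fly: leading spaces are skipped, interior space runs are buffered in a
--     # counter and flushed before the next kept char, trailing ones never
--     # emitted; no intermediate string, no encode/decode, no final .strip().
--     if not text:
--         return ""
--     out = []
--     spaces = 0
--     for c in unicodedata.normalize('NFKD', text):
--         if unicodedata.category(c)[0] in ('C', 'M') or ord(c) >= 128:
--             continue
--         if c == ' ':
--             if out:
--                 spaces += 1
--         else:
--             out.append(' ' * spaces + c)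
--             spaces = 0
--     return ''.join(out)
-- ===== Notes on version B (the rewrite author's own statement) =====
-- stated objective: alternative
-- what changed: Replaces A's staged pipeline (category-filter comprehension building an intermediate string, an ASCII encode/decode round-trip, then .strip()) by a single streaming loop whose accumulator performs the strip itself: leading spaces are skipped, interior space runs are buffered in a counter and flushed before the next kept character, trailing ones are never emitted; no intermediate strings, no encode/decode, no final strip pass.
import Mathlib
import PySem

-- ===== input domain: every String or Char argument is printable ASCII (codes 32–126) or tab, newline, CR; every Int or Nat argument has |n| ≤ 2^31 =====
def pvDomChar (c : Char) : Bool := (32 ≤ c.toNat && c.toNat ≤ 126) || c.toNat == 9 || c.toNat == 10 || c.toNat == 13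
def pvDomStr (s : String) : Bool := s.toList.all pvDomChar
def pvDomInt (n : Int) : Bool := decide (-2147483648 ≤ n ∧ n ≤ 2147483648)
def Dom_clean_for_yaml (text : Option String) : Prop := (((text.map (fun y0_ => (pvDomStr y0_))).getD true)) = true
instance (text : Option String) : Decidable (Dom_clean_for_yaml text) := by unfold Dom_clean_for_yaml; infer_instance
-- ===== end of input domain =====

-- B replaces A's staged pipeline (filter pass, encode/decode pass, final strip) by one streaming loop whose
-- accumulator performs the strip itself (space runs buffered in a counter); alternative decomposition, same cost.


-- ===== PORT A =====
-- category(char)[0] in ('C','M') test: exact on Dom (ASCII codes 9,10,13,32..126): Cc = codes < 32 or 127; no M-category chars in ASCII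
def pvCatCM (c : Char) : Bool := c.toNat < 32 || c.toNat == 127

-- NFKD normalization is the identity on ASCII (Dom), so it is ported as the identity.
def clean_for_yaml (text : Option String) : String :=
  match text with
  | none => ""
  | some t =>
    if t = "" then ""
    else
      let normalized := t
      let cleaned := String.ofList (normalized.toList.filter (fun c => !pvCatCM c))
      let ascii_cleaned := String.ofList (cleaned.toList.filter (fun c => c.toNat < 128))
      PySem.Str.strip ascii_cleaned

-- ===== PORT B =====
-- loop body of Source B: skip C/M-or-non-ASCII chars; a space is counted (only once out is nonempty);
-- a kept non-space char flushes the buffered spaces and resets the counter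
def pvStepB (s : List Char × Nat) (c : Char) : List Char × Nat :=
  if pvCatCM c || decide (128 ≤ c.toNat) then s
  else if c = ' ' then (if s.1.isEmpty then s else (s.1, s.2 + 1))
  else (s.1 ++ (List.replicate s.2 ' ' ++ [c]), 0)

def clean_for_yaml_alt (text : Option String) : String :=
  match text with
  | none => ""
  | some t =>
    if t = "" then ""
    else String.ofList (t.toList.foldl pvStepB ([], 0)).1

-- ===== PRECONDITION & SPEC =====
def Spec_clean_for_yaml (text : Option String) (out : String) : Prop := out = clean_for_yaml_alt text
instance (text : Option String) (out : String) : Decidable (Spec_clean_for_yaml text out) := by unfold Spec_clean_for_yaml; infer_instance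

-- ===== CLAIM (what is proved, stated in full; the proofs are below) =====
def Claim_equal_clean_for_yaml : Prop := ∀ (text : Option String), Dom_clean_for_yaml text → Spec_clean_for_yaml text (clean_for_yaml text)

-- ===== LEMMAS AND PROOFS =====

-- the kept characters (codes 32..126, not 127): what survives A's two filters / B's skip guard
def pvKeep (c : Char) : Bool := !pvCatCM c && decide (c.toNat < 128)

-- B's loop body with the skip guard removed (acts on already-filtered chars)
def pvStepB' (s : List Char × Nat) (c : Char) : List Char × Nat :=
  if c = ' ' then (if s.1.isEmpty then s else (s.1, s.2 + 1))
  else (s.1 ++ (List.replicate s.2 ' ' ++ [c]), 0)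

lemma stepB_eq (s : List Char × Nat) (c : Char) :
    pvStepB s c = if pvKeep c then pvStepB' s c else s := by
  simp only [pvStepB, pvStepB', pvKeep, pvCatCM]
  by_cases h1 : c.toNat < 32 <;> by_cases h2 : c.toNat = 127 <;> by_cases h3 : c.toNat < 128 <;>
    simp [h1, h2, h3]

lemma foldl_ext_eq {α β : Type} (f g : α → β → α) (h : ∀ s c, f s c = g s c) :
    ∀ (l : List β) (s : α), l.foldl f s = l.foldl g s := by
  intro l
  induction l with
  | nil => intro s; rfl
  | cons c m ih => intro s; simp only [List.foldl_cons, h, ih]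

lemma foldl_stepB_filter (l : List Char) (s : List Char × Nat) :
    l.foldl pvStepB s = (l.filter pvKeep).foldl pvStepB' s := by
  rw [List.foldl_filter]
  exact (foldl_ext_eq _ _ (fun s c => stepB_eq s c) l s).symm ▸ rfl

lemma stepB'_space {out : List Char} {k : Nat} (hne : out ≠ []) :
    pvStepB' (out, k) ' ' = (out, k + 1) := by
  simp [pvStepB', hne]

lemma stepB'_space_nil (k : Nat) : pvStepB' ([], k) ' ' = ([], k) := by
  simp [pvStepB']

lemma stepB'_char {out : List Char} {k : Nat} {c : Char} (hc : c ≠ ' ') :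
    pvStepB' (out, k) c = (out ++ (List.replicate k ' ' ++ [c]), 0) := by
  simp [pvStepB', hc]

lemma keep_bounds {c : Char} (h : pvKeep c = true) : 32 ≤ c.toNat ∧ c.toNat ≤ 126 := by
  unfold pvKeep pvCatCM at h
  rcases Bool.and_eq_true_iff.mp h with ⟨h1, h2⟩
  rw [Bool.not_eq_true'] at h1
  rcases Bool.or_eq_false_iff.mp h1 with ⟨ha, hb⟩
  have ha' : ¬ c.toNat < 32 := by simpa using ha
  have hb' : c.toNat ≠ 127 := by simpa using hb
  have h2' : c.toNat < 128 := by simpa using h2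
  omega

lemma keep_isspace {c : Char} (h : pvKeep c = true) :
    PySem.Chars.isspace c = decide (c = ' ') := by
  have hb : 32 ≤ c.toNat ∧ c.toNat ≤ 126 := keep_bounds h
  have hiff : (c = ' ') ↔ c.toNat = 32 := by
    constructor
    · rintro rfl; rfl
    · intro h32
      rw [← Char.ofNat_toNat c, h32]
  simp only [PySem.Chars.isspace]
  by_cases hc : c = ' '
  · simp [hc]
  · have : c.toNat ≠ 32 := fun h32 => hc (hiff.mpr h32)
    have h32 : c.toNat ≠ 32 := fun h' => hc (hiff.mpr h')
    have h1 := hb.1; have h2 := hb.2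
    simp only [hc, decide_false, Bool.or_eq_false_iff, Bool.and_eq_false_iff,
      decide_eq_false_iff_not]
    omega

lemma rstrip_spaces (k : Nat) : PySem.Chars.rstrip (List.replicate k ' ') = [] := by
  induction k with
  | zero => rfl
  | succ n ih =>
    simp only [PySem.Chars.rstrip, List.replicate_succ, List.reverse_cons] at *
    rw [List.dropWhile_append]
    simp_all [PySem.Chars.isspace]

lemma rstrip_cons {c : Char} (h : PySem.Chars.isspace c = false) (m : List Char) :
    PySem.Chars.rstrip (c :: m) = c :: PySem.Chars.rstrip m := by
  simp only [PySem.Chars.rstrip, List.reverse_cons, List.dropWhile_append]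
  split
  · next he =>
    simp only [List.isEmpty_iff] at he
    simp [h, he]
  · next he => simp

lemma rstrip_append_ne_nil (l1 l : List Char) (h : PySem.Chars.rstrip l ≠ []) :
    PySem.Chars.rstrip (l1 ++ l) = l1 ++ PySem.Chars.rstrip l := by
  simp only [PySem.Chars.rstrip, List.reverse_append, List.dropWhile_append] at *
  have : ¬ (List.dropWhile PySem.Chars.isspace l.reverse).isEmpty := by
    simp only [List.isEmpty_iff]
    intro he; exact h (by simp [he])
  simp [this]

-- loop invariant once the output is nonempty: the final output is out ++ (buffered spaces ++ rest) right-stripped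
lemma foldl_stepB'_invariant (m : List Char) :
    ∀ (out : List Char) (k : Nat), out ≠ [] → (∀ c ∈ m, pvKeep c = true) →
    (m.foldl pvStepB' (out, k)).1 = out ++ PySem.Chars.rstrip (List.replicate k ' ' ++ m) := by
  induction m with
  | nil =>
    intro out k hne _
    simp [rstrip_spaces]
  | cons c m' ih =>
    intro out k hne hgood
    have hgood' : ∀ c ∈ m', pvKeep c = true := fun x hx => hgood x (List.mem_cons_of_mem _ hx)
    by_cases hc : c = ' '
    · subst hc
      rw [List.foldl_cons, stepB'_space hne, ih out (k + 1) hne hgood']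
      have : List.replicate (k + 1) ' ' ++ m' = List.replicate k ' ' ++ (' ' :: m') := by
        rw [List.replicate_succ']; simp
      rw [this]
    · have hsp : PySem.Chars.isspace c = false := by
        rw [keep_isspace (hgood c (List.mem_cons_self ..))]; simp [hc]
      rw [List.foldl_cons, stepB'_char hc, ih _ 0 (by simp) hgood']
      have hrs : PySem.Chars.rstrip (List.replicate k ' ' ++ (c :: m')) =
          List.replicate k ' ' ++ (c :: PySem.Chars.rstrip m') := by
        rw [rstrip_append_ne_nil, rstrip_cons hsp]
        rw [rstrip_cons hsp]; simp
      rw [hrs]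
      simp

-- from the empty initial state the loop computes exactly strip (leading spaces are dropped by the isEmpty test)
lemma foldl_stepB'_strip (m : List Char) (hgood : ∀ c ∈ m, pvKeep c = true) :
    (m.foldl pvStepB' (([] : List Char), 0)).1 = PySem.Chars.strip m := by
  induction m with
  | nil => rfl
  | cons c m' ih =>
    have hgood' : ∀ c ∈ m', pvKeep c = true := fun x hx => hgood x (List.mem_cons_of_mem _ hx)
    have hk := hgood c (List.mem_cons_self ..)
    by_cases hc : c = ' '
    · subst hc
      rw [List.foldl_cons, stepB'_space_nil, ih hgood']
      simp [PySem.Chars.strip, PySem.Chars.lstrip, List.dropWhile, PySem.Chars.isspace]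
    · have hsp : PySem.Chars.isspace c = false := by
        rw [keep_isspace hk]; simp [hc]
      rw [List.foldl_cons, stepB'_char hc, foldl_stepB'_invariant m' _ 0 (by simp) hgood']
      simp only [List.replicate_zero, List.nil_append]
      rw [PySem.Chars.strip, PySem.Chars.lstrip, List.dropWhile_cons_of_neg (by simp [hsp]),
        rstrip_cons hsp]
      simp

lemma filter_fun_keep :
    (fun (c : Char) => decide (c.toNat < 128) && !pvCatCM c) = pvKeep := by
  funext c; simp [pvKeep, Bool.and_comm]

-- ===== VERDICT (by name: the statement is the Claim_ definition above) =====
theorem clean_for_yaml_spec : Claim_equal_clean_for_yaml := by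
  intro text _
  unfold Spec_clean_for_yaml clean_for_yaml clean_for_yaml_alt
  cases text with
  | none => rfl
  | some t =>
    by_cases h : t = ""
    · simp [h]
    · simp only [if_neg h]
      rw [foldl_stepB_filter]
      rw [foldl_stepB'_strip _ (fun c hc => (List.mem_filter.mp hc).2)]
      apply String.toList_inj.mp
      simp [PySem.Str.toList_strip, List.filter_filter, filter_fun_keep]
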